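-- pv_equiv track=rewrite | github.com/Kennedh/CodeWars | Simple Fun #50 Array Conversion.py | array_conversion
-- ===== SOURCE A (Python) =====
-- def array_conversion(arr):
--     iteration = 1
--     while len(arr) > 1:
--         new_arr = []
--         if iteration % 2 == 1:
--             for i in range(0, len(arr), 2):
--                 new_arr.append(arr[i] + arr[i + 1])
--         else:
--             for i in range(0, len(arr), 2):
--                 new_arr.append(arr[i] * arr[i + 1])
--         arr = new_arr
--         iteration += 1
--     return arr[0]
-- ===== SOURCE B (Python) =====
-- def array_conversion(arr):
--     # Recursive level reduction: each level pairs consecutive elements by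
--     # zipping one shared iterator with itself (no index arithmetic), then
--     # recurses with the operation toggled.
--     def go(xs, use_sum):
--         if len(xs) <= 1:
--             return xs[0]
--         it = iter(xs)
--         nxt = [(a + b) if use_sum else (a * b) for a, b in zip(it, it)]
--         return go(nxt, not use_sum)
--     return go(arr, True)
-- ===== Notes on version B (the rewrite author's own statement) =====
-- stated objective: alternative
-- what changed: Replaces A's iterative while-loop with an iteration counter, parity test and index-stepping for-loops (arr[i], arr[i+1] over range(0,len,2)) by a recursive level reduction that pairs consecutive elements by zipping one shared iterator with itself and toggles the operation down the recursion.
import Mathlib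
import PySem

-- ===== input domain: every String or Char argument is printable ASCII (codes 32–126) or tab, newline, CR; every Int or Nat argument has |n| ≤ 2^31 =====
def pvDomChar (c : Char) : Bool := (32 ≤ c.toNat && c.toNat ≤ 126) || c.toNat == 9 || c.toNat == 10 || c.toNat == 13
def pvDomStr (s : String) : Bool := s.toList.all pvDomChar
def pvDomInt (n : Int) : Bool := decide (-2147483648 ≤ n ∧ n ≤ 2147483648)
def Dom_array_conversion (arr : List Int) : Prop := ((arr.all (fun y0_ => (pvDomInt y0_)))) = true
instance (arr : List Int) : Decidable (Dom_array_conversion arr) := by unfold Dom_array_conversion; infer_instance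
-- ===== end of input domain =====

-- B replaces A's iterative while-loop (iteration counter + index-stepping for-loops) by a
-- recursive level reduction that pairs consecutive elements structurally; same behaviour, same cost.


-- ===== PORT A =====
-- Literal port of A's while-loop as fuel recursion (fuel = len arr + 1 is always enough: each
-- pass shortens a list longer than 1).  arr[i] / arr[i+1] is pyGetD with default 0: the default
-- is reached exactly where Python raises IndexError (odd-length level, arr[0] of []), outside Pre_.
def aLoop : Nat → List Int → Int → List Int
  | 0, arr, _ => arr
  | f + 1, arr, iteration =>
    if 1 < arr.length then
      let new_arr : List Int :=
        if PySem.Int.mod iteration 2 == 1 then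
          (PySem.List.pyRange 0 (arr.length : Int) 2).foldl
            (fun acc i => acc ++ [PySem.List.pyGetD arr i 0 + PySem.List.pyGetD arr (i + 1) 0]) []
        else
          (PySem.List.pyRange 0 (arr.length : Int) 2).foldl
            (fun acc i => acc ++ [PySem.List.pyGetD arr i 0 * PySem.List.pyGetD arr (i + 1) 0]) []
      aLoop f new_arr (iteration + 1)
    else arr

def array_conversion (arr : List Int) : Int :=
  PySem.List.pyGetD (aLoop (arr.length + 1) arr 1) 0 0

-- ===== PORT B =====
-- zip(it, it) on one shared iterator pairs consecutive elements, dropping an odd leftover: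
-- ported exactly as two-at-a-time structural recursion.
def bPairs (xs : List Int) (useSum : Bool) : List Int :=
  match xs with
  | a :: b :: rest => (if useSum then a + b else a * b) :: bPairs rest useSum
  | _ => []

theorem bPairs_length (b : Bool) : ∀ (xs : List Int), (bPairs xs b).length = xs.length / 2
  | [] => by simp [bPairs]
  | [_] => by simp [bPairs]
  | _ :: _ :: rest => by
    simp only [bPairs, List.length_cons, bPairs_length b rest]
    omega

def bGo (xs : List Int) (useSum : Bool) : Int :=
  if xs.length ≤ 1 then PySem.List.pyGetD xs 0 0
  else bGo (bPairs xs useSum) (!useSum)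
termination_by xs.length
decreasing_by simp only [bPairs_length]; omega

def array_conversion_alt (arr : List Int) : Int := bGo arr true

-- ===== PRECONDITION & SPEC =====
-- Pre_: A returns exactly when every level has even length, i.e. len(arr) is a power of two
-- (including len = 1); otherwise Python raises IndexError (arr[i+1] past the end, or arr[0] of []).
def Pre_array_conversion (arr : List Int) : Prop := arr.length = 2 ^ Nat.log2 arr.length
instance (arr : List Int) : Decidable (Pre_array_conversion arr) := by
  unfold Pre_array_conversion; infer_instance
def pvWitness_array_conversion : List Int := [1, 2, 3, 4]

def Spec_array_conversion (arr : List Int) (out : Int) : Prop := out = array_conversion_alt arr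
instance (arr : List Int) (out : Int) : Decidable (Spec_array_conversion arr out) := by unfold Spec_array_conversion; infer_instance

-- ===== CLAIM (what is proved, stated in full; the proofs are below) =====
def Claim_equal_array_conversion : Prop := ∀ (arr : List Int), Dom_array_conversion arr → Pre_array_conversion arr → Spec_array_conversion arr (array_conversion arr)

-- ===== LEMMAS AND PROOFS =====

-- canonical pairing with an explicit operation: the meeting point of the two level computations
def pairsF (f : Int → Int → Int) : List Int → List Int
  | a :: b :: rest => f a b :: pairsF f rest
  | _ => []

theorem bPairs_true : ∀ (xs : List Int), bPairs xs true = pairsF (fun x y => x + y) xs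
  | [] => rfl
  | [_] => rfl
  | _ :: _ :: rest => by simp [bPairs, pairsF, bPairs_true rest]

theorem bPairs_false : ∀ (xs : List Int), bPairs xs false = pairsF (fun x y => x * y) xs
  | [] => rfl
  | [_] => rfl
  | _ :: _ :: rest => by simp [bPairs, pairsF, bPairs_false rest]

theorem range_half (f : Int → Int → Int) : ∀ (xs : List Int), 2 ∣ xs.length →
    (List.range (xs.length / 2)).map
      (fun k => f (xs.getD (2 * k) 0) (xs.getD (2 * k + 1) 0)) = pairsF f xs
  | [], _ => by simp [pairsF]
  | [_], h => by simp at h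
  | a :: c :: rest, h => by
    have h2 : 2 ∣ rest.length := by
      simp only [List.length_cons] at h; omega
    have hlen : (a :: c :: rest).length / 2 = rest.length / 2 + 1 := by
      simp only [List.length_cons]; omega
    rw [hlen, List.range_succ_eq_map, List.map_cons, List.map_map]
    have hfun : ((fun k => f ((a :: c :: rest).getD (2 * k) 0) ((a :: c :: rest).getD (2 * k + 1) 0)) ∘ Nat.succ)
        = fun k => f (rest.getD (2 * k) 0) (rest.getD (2 * k + 1) 0) := by
      funext k
      have e1 : 2 * (k + 1) = (2 * k + 1) + 1 := by ring
      simp only [Function.comp_apply, Nat.succ_eq_add_one, e1, List.getD_cons_succ]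
    rw [hfun, range_half f rest h2]
    simp [pairsF]

theorem level_eq (f : Int → Int → Int) (xs : List Int) (h : 2 ∣ xs.length) :
    (PySem.List.pyRange 0 (xs.length : Int) 2).foldl
      (fun acc i => acc ++ [f (PySem.List.pyGetD xs i 0) (PySem.List.pyGetD xs (i + 1) 0)]) []
      = pairsF f xs := by
  rw [PySem.List.foldl_append_singleton_eq_map, List.nil_append,
      PySem.List.pyRange_of_pos 0 (xs.length : Int) (by norm_num), List.map_map]
  have hcnt : (if (0 : Int) < (xs.length : Int) then (((xs.length : Int) - 0 + 2 - 1) / 2).toNat else 0)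
      = xs.length / 2 := by
    rcases Nat.eq_zero_or_pos xs.length with h0 | h0
    · simp [h0]
    · rw [if_pos (by exact_mod_cast h0)]
      omega
  rw [hcnt]
  have hfun : ((fun i => f (PySem.List.pyGetD xs i 0) (PySem.List.pyGetD xs (i + 1) 0)) ∘ fun k : Nat => (0 : Int) + 2 * (k : Int))
      = fun k : Nat => f (xs.getD (2 * k) 0) (xs.getD (2 * k + 1) 0) := by
    funext k
    have e1 : (0 : Int) + 2 * (k : Int) = ((2 * k : Nat) : Int) := by push_cast; ring
    have e3 : ((2 * k : Nat) : Int) + 1 = ((2 * k + 1 : Nat) : Int) := by push_cast; ring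
    simp only [Function.comp_apply, e1, e3, PySem.List.pyGetD_natCast]
  rw [hfun, range_half f xs h]

theorem level_eq_sum (xs : List Int) (h : 2 ∣ xs.length) :
    (PySem.List.pyRange 0 (xs.length : Int) 2).foldl
      (fun acc i => acc ++ [PySem.List.pyGetD xs i 0 + PySem.List.pyGetD xs (i + 1) 0]) []
      = bPairs xs true := by
  rw [bPairs_true]; exact level_eq (fun x y => x + y) xs h

theorem level_eq_mul (xs : List Int) (h : 2 ∣ xs.length) :
    (PySem.List.pyRange 0 (xs.length : Int) 2).foldl
      (fun acc i => acc ++ [PySem.List.pyGetD xs i 0 * PySem.List.pyGetD xs (i + 1) 0]) []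
      = bPairs xs false := by
  rw [bPairs_false]; exact level_eq (fun x y => x * y) xs h

theorem loop_eq : ∀ (k : Nat), ∀ (fuel : Nat) (arr : List Int) (it : Int) (b : Bool),
    arr.length = 2 ^ k → k ≤ fuel → ((PySem.Int.mod it 2 == 1) = b) →
    PySem.List.pyGetD (aLoop fuel arr it) 0 0 = bGo arr b := by
  intro k
  induction k with
  | zero =>
    intro fuel arr it b hlen _ _
    have h1 : ¬ 1 < arr.length := by simp at hlen; omega
    have ha : aLoop fuel arr it = arr := by
      cases fuel with
      | zero => rfl
      | succ f => simp only [aLoop, if_neg h1]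
    rw [ha, bGo, if_pos (by omega)]
  | succ k ih =>
    intro fuel arr it b hlen hfuel hb
    obtain ⟨f, rfl⟩ : ∃ f, fuel = f + 1 := ⟨fuel - 1, by omega⟩
    have h1 : 1 < arr.length := by
      rw [hlen]
      calc 1 < 2 := by norm_num
        _ ≤ 2 ^ (k + 1) := Nat.le_self_pow (by omega) 2
    have hdvd : 2 ∣ arr.length := by rw [hlen, pow_succ]; exact dvd_mul_left 2 (2 ^ k)
    have hmod : ∀ x : Int, PySem.Int.mod x 2 = x % 2 :=
      fun x => PySem.Int.mod_eq_emod_of_pos (by norm_num)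
    have hlen' : ∀ b' : Bool, (bPairs arr b').length = 2 ^ k := by
      intro b'; rw [bPairs_length, hlen, pow_succ]; omega
    rw [bGo, if_neg (by omega)]
    simp only [aLoop, if_pos h1]
    cases b with
    | true =>
      have hit : it % 2 = 1 := by rw [← hmod]; simpa using hb
      have hit' : ((PySem.Int.mod (it + 1) 2 == 1) = false) := by
        have : (it + 1) % 2 = 0 := by omega
        simp [this]
      simp only [hb, level_eq_sum arr hdvd]
      exact ih f (bPairs arr true) (it + 1) false (hlen' true) (by omega) hit'
    | false =>
      have hit : it % 2 = 0 := by
        by_contra hne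
        have h1' : PySem.Int.mod it 2 = 1 := by rw [hmod]; omega
        rw [h1'] at hb
        simp at hb
      have hit' : ((PySem.Int.mod (it + 1) 2 == 1) = true) := by
        have : (it + 1) % 2 = 1 := by omega
        simp [this]
      simp only [hb, level_eq_mul arr hdvd]
      exact ih f (bPairs arr false) (it + 1) true (hlen' false) (by omega) hit'

-- ===== VERDICT (by name: the statement is the Claim_ definition above) =====
theorem array_conversion_spec : Claim_equal_array_conversion := by
  intro arr _ hpre
  unfold Spec_array_conversion array_conversion array_conversion_alt
  refine loop_eq (Nat.log2 arr.length) (arr.length + 1) arr 1 true hpre ?_ (by decide)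
  have h := Nat.lt_two_pow_self (n := Nat.log2 arr.length)
  unfold Pre_array_conversion at hpre
  omega
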